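-- pv_equiv track=rewrite | github.com/bimbo721/facu | entrenamiento/tp 2.py | validez_destinatario
-- ===== SOURCE A (Python) =====
-- def validez_destinatario(codigo_identificacion_destinatario):
--     codigo_identificacion_destinatario = codigo_identificacion_destinatario.strip()
--     reglas = ("QWERTYUIOPASDFGHJKLÑZXCVBNM-1234567890")
--     bandera_hay_letra = False
--
--     for letra in codigo_identificacion_destinatario:
--         if letra in reglas:
--             if letra != "-":
--                 bandera_hay_letra = True
--         else:
--             return False
--
--     if bandera_hay_letra == True:
--         return True
--     else:
--         return False
-- ===== SOURCE B (Python) =====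
-- def validez_destinatario(codigo_identificacion_destinatario):
--     t = codigo_identificacion_destinatario.strip()
--     reglas = ("QWERTYUIOPASDFGHJKLÑZXCVBNM-1234567890")
--     # stripping the allowed characters from both ends eats the whole string
--     # exactly when every character is allowed; stripping dashes leaves a
--     # nonempty string exactly when some character is not a dash.
--     return not t.strip(reglas) and bool(t.strip("-"))
-- ===== Notes on version B (the rewrite author's own statement) =====
-- stated objective: simpler
-- what changed: Replaces A's character-by-character loop with early return and a boolean flag by two calls to str.strip(chars): stripping the allowed characters must consume the whole string, and stripping dashes must leave something; no explicit loop or flag remains.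
import Mathlib
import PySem

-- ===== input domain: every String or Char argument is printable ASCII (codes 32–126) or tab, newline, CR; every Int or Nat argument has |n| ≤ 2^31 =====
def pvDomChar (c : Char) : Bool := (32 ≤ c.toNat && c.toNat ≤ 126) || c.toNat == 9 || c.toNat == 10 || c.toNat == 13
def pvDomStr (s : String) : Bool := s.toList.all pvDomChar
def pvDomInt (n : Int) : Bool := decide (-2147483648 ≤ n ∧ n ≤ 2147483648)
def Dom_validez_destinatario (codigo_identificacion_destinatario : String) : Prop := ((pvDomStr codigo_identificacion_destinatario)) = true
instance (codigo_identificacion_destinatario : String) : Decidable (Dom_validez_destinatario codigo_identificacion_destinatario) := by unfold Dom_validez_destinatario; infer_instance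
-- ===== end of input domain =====

-- B replaces A's per-character loop/early-return/flag by two two-ended str.strip(chars) tests (simpler).

-- ===== PORT A =====
-- A's allowed-character string 'reglas'; 'letra in reglas' on a single char is char membership.
def reglasA : List Char := "QWERTYUIOPASDFGHJKLÑZXCVBNM-1234567890".toList

-- the for-loop with the early 'return False' and the flag 'bandera_hay_letra'
def vdLoop : List Char → Bool → Bool
  | [], bandera => bandera
  | letra :: rest, bandera =>
      if letra ∈ reglasA then
        vdLoop rest (if letra ≠ '-' then true else bandera)
      else
        false

def validez_destinatario (codigo_identificacion_destinatario : String) : Bool :=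
  vdLoop (PySem.Str.strip codigo_identificacion_destinatario).toList false

-- ===== PORT B =====
def validez_destinatario_alt (codigo_identificacion_destinatario : String) : Bool :=
  let t := PySem.Str.strip codigo_identificacion_destinatario
  let reglas := "QWERTYUIOPASDFGHJKLÑZXCVBNM-1234567890"
  (PySem.Str.stripChars t reglas == "") && !(PySem.Str.stripChars t "-" == "")

-- ===== PRECONDITION & SPEC =====
def Spec_validez_destinatario (codigo_identificacion_destinatario : String) (out : Bool) : Prop := out = validez_destinatario_alt codigo_identificacion_destinatario
instance (codigo_identificacion_destinatario : String) (out : Bool) : Decidable (Spec_validez_destinatario codigo_identificacion_destinatario out) := by unfold Spec_validez_destinatario; infer_instance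

-- ===== CLAIM (what is proved, stated in full; the proofs are below) =====
def Claim_equal_validez_destinatario : Prop := ∀ (codigo_identificacion_destinatario : String), Dom_validez_destinatario codigo_identificacion_destinatario → Spec_validez_destinatario codigo_identificacion_destinatario (validez_destinatario codigo_identificacion_destinatario)

-- ===== LEMMAS AND PROOFS =====

-- A's loop computes: all characters allowed, and (flag already set or some character ≠ '-').
theorem vdLoop_eq (l : List Char) (b : Bool) :
    vdLoop l b
      = (l.all (fun c => decide (c ∈ reglasA)) && (b || l.any (fun c => decide (c ≠ '-')))) := by
  induction l generalizing b with
  | nil => simp [vdLoop]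
  | cons c rest ih =>
      by_cases hc : c ∈ reglasA
      · by_cases hd : c = '-' <;>
          simp [vdLoop, hc, hd, ih, Bool.and_assoc]
      · simp [vdLoop, hc]

-- two-ended stripChars eats the whole list exactly when every element is in 'chars'
theorem stripChars_eq_nil_iff (l chars : List Char) :
    PySem.Chars.stripChars l chars = [] ↔ ∀ c ∈ l, chars.contains c = true := by
  unfold PySem.Chars.stripChars
  simp only [List.reverse_eq_nil_iff, List.dropWhile_eq_nil_iff, List.mem_reverse]
  constructor
  · intro h c hc
    rcases (List.mem_append.mp
      ((List.takeWhile_append_dropWhile (p := fun c => chars.contains c) (l := l)) ▸ hc)) with h1 | h1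
    · exact List.mem_takeWhile_imp h1
    · exact h c h1
  · intro h c hc
    exact h c (List.dropWhile_sublist (p := fun c => chars.contains c) |>.subset hc)

-- B's first test equals A's 'all characters allowed'
theorem stripA_eq_all (t : String) :
    (PySem.Str.stripChars t "QWERTYUIOPASDFGHJKLÑZXCVBNM-1234567890" == "")
      = t.toList.all (fun c => decide (c ∈ reglasA)) := by
  rw [Bool.eq_iff_iff]
  rw [show (PySem.Str.stripChars t "QWERTYUIOPASDFGHJKLÑZXCVBNM-1234567890" == "") = true
        ↔ PySem.Chars.stripChars t.toList reglasA = [] from by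
      rw [beq_iff_eq, ← String.toList_inj, PySem.Str.toList_stripChars]; rfl]
  simp [stripChars_eq_nil_iff, List.all_eq_true, List.contains_eq_mem]

-- B's second test equals the negation of A's 'some character ≠ '-''
theorem stripDash_eq_not_any (t : String) :
    (PySem.Str.stripChars t "-" == "")
      = !(t.toList.any (fun c => decide (c ≠ '-'))) := by
  rw [Bool.eq_iff_iff]
  rw [show (PySem.Str.stripChars t "-" == "") = true
        ↔ PySem.Chars.stripChars t.toList ['-'] = [] from by
      rw [beq_iff_eq, ← String.toList_inj, PySem.Str.toList_stripChars]; rfl]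
  simp [stripChars_eq_nil_iff, List.contains_eq_mem]

-- ===== VERDICT (by name: the statement is the Claim_ definition above) =====
theorem validez_destinatario_spec : Claim_equal_validez_destinatario := by
  intro s _
  unfold Spec_validez_destinatario
  simp only [validez_destinatario, validez_destinatario_alt, vdLoop_eq,
             stripA_eq_all, stripDash_eq_not_any, Bool.not_not, Bool.false_or]
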